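-- pv_equiv track=rewrite | github.com/HamiGames/Lucid | infrastructure/containers/inject_dockerfile_x_files_skeleton.py | prune_dirs_for_runtime_copy
-- ===== SOURCE A (Python) =====
-- def prune_dirs_for_runtime_copy(dirs: set[str]) -> list[str]:
--     """
--     Drop ``./child`` when ``./parent`` is also in the set (parent COPY covers the subtree).
--     """
--     candidates = [d for d in dirs if d != "."]
--     if not candidates:
--         return []
--     candidates_sorted = sorted(candidates, key=lambda s: (s.count("/"), len(s)))
--     out: list[str] = []
--     for d in candidates_sorted:
--         dd = d.rstrip("/")
--         is_child = False
--         for p in candidates: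
--             if p == d:
--                 continue
--             pp = p.rstrip("/")
--             if dd != pp and dd.startswith(pp + "/"):
--                 is_child = True
--                 break
--         if not is_child:
--             out.append(d)
--     return sorted(out, key=lambda s: (s.count("/"), s))
-- ===== SOURCE B (Python) =====
-- def prune_dirs_for_runtime_copy(dirs: set[str]) -> list[str]:
--     """
--     Drop ``./child`` when ``./parent`` is also in the set (parent COPY covers the subtree).
--     """
--     norm = {p.rstrip("/") for p in dirs if p != "."}
--     out: list[str] = []
--     for d in dirs:
--         if d == ".":
--             continue
--         dd = d.rstrip("/")
--         # d is a covered child iff some ancestor cut of dd (the text before a '/') is itself present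
--         if not any(dd[:j] in norm for j in range(len(dd)) if dd[j] == "/"):
--             out.append(d)
--     return sorted(out, key=lambda s: (s.count("/"), s))
-- ===== Notes on version B (the rewrite author's own statement) =====
-- stated objective: faster
-- what changed: B replaces A's quadratic scan of all other candidates per directory by one set of normalized candidates built up front and queried at each '/'-cut prefix of the directory, and drops A's decorative pre-sort; the final (count('/'), s) sort is kept.
import Mathlib
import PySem

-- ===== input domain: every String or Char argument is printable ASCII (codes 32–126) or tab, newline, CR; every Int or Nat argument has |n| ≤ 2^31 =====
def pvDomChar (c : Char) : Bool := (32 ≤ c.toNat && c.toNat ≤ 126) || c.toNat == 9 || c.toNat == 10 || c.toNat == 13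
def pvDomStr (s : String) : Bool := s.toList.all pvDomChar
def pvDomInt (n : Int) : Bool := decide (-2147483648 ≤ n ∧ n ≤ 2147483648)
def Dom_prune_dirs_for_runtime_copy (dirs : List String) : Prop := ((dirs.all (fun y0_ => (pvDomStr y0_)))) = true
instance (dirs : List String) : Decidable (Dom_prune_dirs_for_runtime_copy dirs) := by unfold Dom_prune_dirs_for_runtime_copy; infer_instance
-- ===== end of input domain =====

-- B replaces A's quadratic all-pairs ancestor scan by one hash set of normalized paths
-- queried at each '/'-cut prefix (linear number of set lookups); same return value.

-- s.rstrip("/") — drop trailing '/' characters (exact; shared Python built-in of both versions)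
def pvRstripSlash (cs : List Char) : List Char := (cs.reverse.dropWhile (· == '/')).reverse

-- ===== PORT A =====
def prune_dirs_for_runtime_copy (dirs : List String) : List String :=
  let candidates := dirs.filter (fun d => decide (d ≠ "."))
  if candidates = [] then []
  else
    let candidates_sorted := PySem.List.sorted2 candidates
      (fun s => PySem.Str.count s "/") (fun s => PySem.Str.len s)
    let out := candidates_sorted.foldl (fun out d =>
      let dd := pvRstripSlash d.toList
      let is_child := candidates.any (fun p =>   -- inner for-loop with break = any
        if p = d then false                       -- continue
        else
          let pp := pvRstripSlash p.toList
          decide (dd ≠ pp) && PySem.Chars.startswith dd (pp ++ ['/']))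
      if is_child then out else out ++ [d]) ([] : List String)
    PySem.List.sorted2 out (fun s => PySem.Str.count s "/") (fun s => s)

-- ===== PORT B =====
def prune_dirs_for_runtime_copy_alt (dirs : List String) : List String :=
  let norm : PySem.Set (List Char) :=
    PySem.Set.ofList ((dirs.filter (fun p => decide (p ≠ "."))).map (fun p => pvRstripSlash p.toList))
  let out := dirs.foldl (fun out d =>
    if d = "." then out
    else
      let dd := pvRstripSlash d.toList
      let isChild := (List.range dd.length).any (fun j =>
        dd.getD j ' ' == '/' && norm.contains (dd.take j))
      if isChild then out else out ++ [d]) ([] : List String)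
  PySem.List.sorted2 out (fun s => PySem.Str.count s "/") (fun s => s)

-- ===== PRECONDITION & SPEC =====
def Spec_prune_dirs_for_runtime_copy (dirs : List String) (out : List String) : Prop := out = prune_dirs_for_runtime_copy_alt dirs
instance (dirs : List String) (out : List String) : Decidable (Spec_prune_dirs_for_runtime_copy dirs out) := by unfold Spec_prune_dirs_for_runtime_copy; infer_instance

-- ===== CLAIM (what is proved, stated in full; the proofs are below) =====
def Claim_equal_prune_dirs_for_runtime_copy : Prop := ∀ (dirs : List String), Dom_prune_dirs_for_runtime_copy dirs → Spec_prune_dirs_for_runtime_copy dirs (prune_dirs_for_runtime_copy dirs)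

-- ===== LEMMAS AND PROOFS =====

-- d is a covered child: some candidate, once normalized and extended by '/', is a prefix of d's normalization
def pvCovered (candidates : List String) (d : String) : Prop :=
  ∃ p ∈ candidates, (pvRstripSlash p.toList ++ ['/']) <+: pvRstripSlash d.toList

-- the '/'-cut characterization of the ancestor-prefix relation
lemma pv_prefix_slash_iff (pp dd : List Char) :
    (pp ++ ['/']) <+: dd ↔ ∃ j < dd.length, dd.getD j ' ' = '/' ∧ dd.take j = pp := by
  constructor
  · rintro ⟨t, ht⟩
    have hassoc : pp ++ ['/'] ++ t = pp ++ '/' :: t := by simp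
    refine ⟨pp.length, ?_, ?_, ?_⟩
    · subst ht; simp
    · subst ht
      rw [hassoc, List.getD_eq_getElem?_getD, List.getElem?_append_right (le_refl pp.length)]
      simp
    · subst ht
      rw [hassoc]
      exact List.take_left
  · rintro ⟨j, hj, hc, hp⟩
    have hgE : dd[j] = '/' := by rw [← List.getD_eq_getElem dd ' ' hj, hc]
    have hj' : dd[j]?.toList = ['/'] := by
      rw [List.getElem?_eq_getElem hj, hgE]; rfl
    have h2 : pp ++ ['/'] = dd.take (j + 1) := by
      rw [List.take_add_one, hp, hj']
    rw [h2]; exact List.take_prefix _ _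

-- A's inner scan decides pvCovered
lemma pv_childA_iff (candidates : List String) (d : String) :
    (candidates.any (fun p =>
        if p = d then false
        else
          decide (pvRstripSlash d.toList ≠ pvRstripSlash p.toList) &&
            PySem.Chars.startswith (pvRstripSlash d.toList) (pvRstripSlash p.toList ++ ['/']))) = true
      ↔ pvCovered candidates d := by
  rw [List.any_eq_true]
  constructor
  · rintro ⟨p, hp, hcond⟩
    by_cases hpd : p = d
    · simp [hpd] at hcond
    · rw [if_neg hpd] at hcond
      simp only [Bool.and_eq_true, decide_eq_true_eq, PySem.Chars.startswith_iff] at hcond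
      exact ⟨p, hp, hcond.2⟩
  · rintro ⟨p, hp, hpre⟩
    have hlen : (pvRstripSlash p.toList).length < (pvRstripSlash d.toList).length := by
      have := hpre.length_le; simp at this; omega
    have hne : pvRstripSlash d.toList ≠ pvRstripSlash p.toList := by
      intro h; rw [h] at hlen; omega
    have hpd : p ≠ d := by
      intro h; exact hne (by rw [h])
    exact ⟨p, hp, by
      rw [if_neg hpd]
      simp only [Bool.and_eq_true, decide_eq_true_eq, PySem.Chars.startswith_iff]
      exact ⟨hne, hpre⟩⟩

-- B's prefix-of-d scan over the '/' positions decides pvCovered too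
lemma pv_childB_iff (candidates : List String) (d : String) :
    ((List.range (pvRstripSlash d.toList).length).any (fun j =>
        (pvRstripSlash d.toList).getD j ' ' == '/' &&
          (PySem.Set.ofList (candidates.map (fun p => pvRstripSlash p.toList))).contains
            ((pvRstripSlash d.toList).take j))) = true
      ↔ pvCovered candidates d := by
  rw [List.any_eq_true]
  constructor
  · rintro ⟨j, hj, hcond⟩
    rw [List.mem_range] at hj
    simp only [Bool.and_eq_true, beq_iff_eq, PySem.Set.contains_iff, PySem.Set.mem_ofList,
      List.mem_map] at hcond
    obtain ⟨hc, p, hp, hpp⟩ := hcond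
    exact ⟨p, hp, (pv_prefix_slash_iff _ _).2 ⟨j, hj, hc, hpp.symm⟩⟩
  · rintro ⟨p, hp, hpre⟩
    obtain ⟨j, hj, hc, hpp⟩ := (pv_prefix_slash_iff _ _).1 hpre
    refine ⟨j, List.mem_range.2 hj, ?_⟩
    simp only [Bool.and_eq_true, beq_iff_eq, PySem.Set.contains_iff, PySem.Set.mem_ofList,
      List.mem_map]
    exact ⟨hc, p, hp, hpp.symm⟩

-- Python's tuple key (k1(x), k2(x)) is the lexicographic product key
lemma pv_sorted2_eq_sorted_lex {α κ₁ κ₂ : Type} [LinearOrder κ₁] [LinearOrder κ₂]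
    (xs : List α) (k1 : α → κ₁) (k2 : α → κ₂) :
    PySem.List.sorted2 xs k1 k2 = PySem.List.sorted xs (fun x => toLex (k1 x, k2 x)) := by
  rw [PySem.List.sorted_eq_foldl_insertBy]
  have hlt : (fun (a b : α) => decide (k1 a < k1 b) || (!decide (k1 b < k1 a) && decide (k2 a < k2 b)))
      = fun a b => decide (toLex (k1 a, k2 a) < toLex (k1 b, k2 b)) := by
    funext a b
    rcases lt_trichotomy (k1 a) (k1 b) with h | h | h
    · simp [Prod.Lex.lt_iff, h, h.not_gt]
    · simp [Prod.Lex.lt_iff, h]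
    · simp [Prod.Lex.lt_iff, h, h.not_gt, h.ne']
  simp only [PySem.List.sorted2, hlt, Bool.false_eq_true, if_false]

lemma pv_key_injective :
    Function.Injective (fun s : String => toLex ((PySem.Str.count s "/" : Nat), s)) := by
  intro a b h
  have := congrArg (fun t : Lex (Nat × String) => (ofLex t).2) h
  simpa using this

-- kept-element multisets of the two passes coincide
lemma pv_out_perm (dirs : List String) :
    (List.filter (fun d =>
        !((List.range (pvRstripSlash d.toList).length).any (fun j =>
          (pvRstripSlash d.toList).getD j ' ' == '/' &&
            (PySem.Set.ofList ((dirs.filter (fun p => decide (p ≠ "."))).map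
              (fun p => pvRstripSlash p.toList))).contains ((pvRstripSlash d.toList).take j))) &&
        decide (d ≠ ".")) dirs).Perm
    (List.filter (fun d =>
        !((dirs.filter (fun p => decide (p ≠ "."))).any (fun p =>
          if p = d then false
          else
            decide (pvRstripSlash d.toList ≠ pvRstripSlash p.toList) &&
              PySem.Chars.startswith (pvRstripSlash d.toList) (pvRstripSlash p.toList ++ ['/']))))
      (PySem.List.sorted (dirs.filter (fun p => decide (p ≠ ".")))
        (fun x => toLex ((PySem.Str.count x "/" : Nat), PySem.Str.len x)))) := by
  classical
  have hfilters : List.filter (fun d =>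
        !((List.range (pvRstripSlash d.toList).length).any (fun j =>
          (pvRstripSlash d.toList).getD j ' ' == '/' &&
            (PySem.Set.ofList ((dirs.filter (fun p => decide (p ≠ "."))).map
              (fun p => pvRstripSlash p.toList))).contains ((pvRstripSlash d.toList).take j))) &&
        decide (d ≠ ".")) dirs =
      List.filter (fun d =>
        !((dirs.filter (fun p => decide (p ≠ "."))).any (fun p =>
          if p = d then false
          else
            decide (pvRstripSlash d.toList ≠ pvRstripSlash p.toList) &&
              PySem.Chars.startswith (pvRstripSlash d.toList) (pvRstripSlash p.toList ++ ['/']))))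
        (dirs.filter (fun p => decide (p ≠ "."))) := by
    rw [List.filter_filter]
    apply List.filter_congr
    intro d _
    congr 1
    congr 1
    rw [Bool.eq_iff_iff, pv_childB_iff, pv_childA_iff]
  rw [hfilters]
  exact (List.Perm.filter _ (PySem.List.sorted_perm (dirs.filter (fun p => decide (p ≠ ".")))
    (fun x => toLex ((PySem.Str.count x "/" : Nat), PySem.Str.len x)) false)).symm

-- the A-side loop body is an append-if fold
lemma pv_bodyA (candidates : List String) :
    (fun (out : List String) (d : String) =>
      let dd := pvRstripSlash d.toList
      let is_child := candidates.any (fun p =>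
        if p = d then false
        else
          let pp := pvRstripSlash p.toList
          decide (dd ≠ pp) && PySem.Chars.startswith dd (pp ++ ['/']))
      if is_child then out else out ++ [d])
    = fun out d =>
      if (!(candidates.any (fun p =>
          if p = d then false
          else
            decide (pvRstripSlash d.toList ≠ pvRstripSlash p.toList) &&
              PySem.Chars.startswith (pvRstripSlash d.toList) (pvRstripSlash p.toList ++ ['/']))))
        then out ++ [id d] else out := by
  funext out d
  by_cases h : (candidates.any (fun p =>
      if p = d then false
      else
        decide (pvRstripSlash d.toList ≠ pvRstripSlash p.toList) &&
          PySem.Chars.startswith (pvRstripSlash d.toList) (pvRstripSlash p.toList ++ ['/']))) = true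
  · simp only [h]
    simp
  · simp only [Bool.not_eq_true] at h
    simp only [h]
    simp

-- the B-side loop body is an append-if fold
lemma pv_bodyB (norm : PySem.Set (List Char)) :
    (fun (out : List String) (d : String) =>
      if d = "." then out
      else
        let dd := pvRstripSlash d.toList
        let isChild := (List.range dd.length).any (fun j =>
          dd.getD j ' ' == '/' && norm.contains (dd.take j))
        if isChild then out else out ++ [d])
    = fun out d =>
      if ((!((List.range (pvRstripSlash d.toList).length).any (fun j =>
            (pvRstripSlash d.toList).getD j ' ' == '/' && norm.contains ((pvRstripSlash d.toList).take j)))) &&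
          decide (d ≠ "."))
        then out ++ [id d] else out := by
  funext out d
  by_cases hd : d = "."
  · subst hd
    simp
  · by_cases h : ((List.range (pvRstripSlash d.toList).length).any (fun j =>
        (pvRstripSlash d.toList).getD j ' ' == '/' && norm.contains ((pvRstripSlash d.toList).take j))) = true
    · simp only [h]
      simp [hd]
    · simp only [Bool.not_eq_true] at h
      simp only [h]
      simp [hd]

-- ===== VERDICT (by name: the statement is the Claim_ definition above) =====
theorem prune_dirs_for_runtime_copy_spec : Claim_equal_prune_dirs_for_runtime_copy := by
  intro dirs _
  unfold Spec_prune_dirs_for_runtime_copy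
  simp only [prune_dirs_for_runtime_copy, prune_dirs_for_runtime_copy_alt]
  rw [pv_bodyA, pv_bodyB, PySem.List.foldl_append_if, PySem.List.foldl_append_if,
    List.map_id, List.map_id, List.nil_append, List.nil_append]
  by_cases hc : dirs.filter (fun d => decide (d ≠ ".")) = []
  · rw [if_pos hc]
    have hall := List.filter_eq_nil_iff.mp hc
    have hB : List.filter (fun d =>
        (!((List.range (pvRstripSlash d.toList).length).any (fun j =>
          (pvRstripSlash d.toList).getD j ' ' == '/' &&
            (PySem.Set.ofList ((dirs.filter (fun p => decide (p ≠ "."))).map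
              (fun p => pvRstripSlash p.toList))).contains ((pvRstripSlash d.toList).take j)))) &&
        decide (d ≠ ".")) dirs = [] := by
      refine List.filter_eq_nil_iff.mpr (fun a ha => ?_)
      simp only [Bool.and_eq_true, not_and]
      intro _
      exact hall a ha
    rw [hB]
    rfl
  · rw [if_neg hc]
    simp only [pv_sorted2_eq_sorted_lex]
    exact PySem.List.sorted_eq_sorted_of_perm _ _ _ pv_key_injective (pv_out_perm dirs).symm
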